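-- pv_equiv track=rewrite | github.com/dthanhvu03/threadsauto | services/scheduler/job_validator.py | _is_suspicious_content
-- ===== SOURCE A (Python) =====
-- def _is_suspicious_content(content: str) -> bool:
--     """
--     Check content có suspicious không (spam, invalid, etc.).
--
--     Returns:
--         True nếu suspicious
--     """
--     # Check empty hoặc chỉ whitespace
--     if not content or not content.strip():
--         return True
--
--     # Check quá nhiều ký tự đặc biệt
--     special_chars = sum(1 for c in content if not c.isalnum() and not c.isspace())
--     if len(content) > 0 and special_chars / len(content) > 0.5:
--         return True
--
--     # Check quá nhiều spaces liên tiếp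
--     if "  " * 10 in content:
--         return True
--
--     # Check chỉ có emoji hoặc ký tự đặc biệt
--     if len(content) > 10 and not any(c.isalnum() for c in content):
--         return True
--
--     return False
-- ===== SOURCE B (Python) =====
-- def _is_suspicious_content(content: str) -> bool:
--     """Single pass: accumulate length, special-char count, alnum/non-space flags
--     and the longest run of ' ' chars, then combine the conditions once."""
--     n = 0
--     special = 0
--     saw_alnum = False
--     saw_nonspace = False
--     run = 0
--     max_run = 0
--     for c in content:
--         n += 1
--         if c.isalnum():
--             saw_alnum = True
--             saw_nonspace = True
--         elif not c.isspace():
--             special += 1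
--             saw_nonspace = True
--         if c == ' ':
--             run += 1
--             if run > max_run:
--                 max_run = run
--         else:
--             run = 0
--     return (n == 0
--             or not saw_nonspace
--             or 2 * special > n
--             or max_run >= 20
--             or (n > 10 and not saw_alnum))
-- ===== Notes on version B (the rewrite author's own statement) =====
-- stated objective: alternative
-- what changed: B replaces A's three separate passes over content (special-char sum, substring search for 20 spaces, any-alnum scan) plus strip() by a single loop that accumulates length, special count, saw-alnum/saw-nonspace flags and the longest run of ' ', combining all conditions once at the end.
import Mathlib
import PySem

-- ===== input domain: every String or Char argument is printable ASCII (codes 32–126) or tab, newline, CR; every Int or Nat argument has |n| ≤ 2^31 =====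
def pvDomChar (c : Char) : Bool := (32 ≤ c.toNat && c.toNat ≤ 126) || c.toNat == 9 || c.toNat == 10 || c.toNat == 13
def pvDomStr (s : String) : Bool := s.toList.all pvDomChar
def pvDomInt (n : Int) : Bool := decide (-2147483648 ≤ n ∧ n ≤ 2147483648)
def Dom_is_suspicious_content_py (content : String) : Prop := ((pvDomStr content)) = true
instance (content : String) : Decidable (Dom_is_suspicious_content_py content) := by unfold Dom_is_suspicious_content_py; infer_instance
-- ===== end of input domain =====

-- B is a single-pass accumulator loop replacing A's multiple scans; return values proved equal on all of Dom.

-- ===== PORT A =====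
-- Python A: early-return on empty/whitespace-only, then special-char ratio, then 20-space
-- substring ("  " * 10), then len > 10 with no alnum.  The float test special/len > 0.5 is
-- ported as 2 * special > len, which is exact for these string lengths.
def is_suspicious_content_py (content : String) : Bool :=
  if PySem.Str.len content == 0 || PySem.Str.len (PySem.Str.strip content) == 0 then
    true
  else
    let special : Int := content.toList.foldl
      (fun acc c => if !(PySem.Chars.isalnum c) && !(PySem.Chars.isspace c) then acc + 1 else acc) 0
    if PySem.Str.len content > 0 && decide (2 * special > PySem.Str.len content) then
      true
    else if PySem.Str.isIn "                    " content then  -- "  " * 10 = 20 spaces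
      true
    else if PySem.Str.len content > 10 && !(content.toList.any PySem.Chars.isalnum) then
      true
    else
      false

-- ===== PORT B =====
-- state: (n, special, sawAlnum, sawNonspace, run, maxRun)
def pvAltStep (st : Int × Int × Bool × Bool × Int × Int) (c : Char) : Int × Int × Bool × Bool × Int × Int :=
  match st with
  | (n, special, sawAlnum, sawNonspace, run, maxRun) =>
    let n := n + 1
    let (special, sawAlnum, sawNonspace) :=
      if PySem.Chars.isalnum c then (special, true, true)
      else if !(PySem.Chars.isspace c) then (special + 1, sawAlnum, true)
      else (special, sawAlnum, sawNonspace)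
    let (run, maxRun) :=
      if c == ' ' then (run + 1, if run + 1 > maxRun then run + 1 else maxRun)
      else (0, maxRun)
    (n, special, sawAlnum, sawNonspace, run, maxRun)

def is_suspicious_content_py_alt (content : String) : Bool :=
  match content.toList.foldl pvAltStep (0, 0, false, false, 0, 0) with
  | (n, special, sawAlnum, sawNonspace, _, maxRun) =>
    n == 0 || !sawNonspace || decide (2 * special > n) || decide (20 ≤ maxRun)
      || (decide (10 < n) && !sawAlnum)

-- ===== PRECONDITION & SPEC =====
def Spec_is_suspicious_content_py (content : String) (out : Bool) : Prop := out = is_suspicious_content_py_alt content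
instance (content : String) (out : Bool) : Decidable (Spec_is_suspicious_content_py content out) := by unfold Spec_is_suspicious_content_py; infer_instance

-- ===== CLAIM (what is proved, stated in full; the proofs are below) =====
def Claim_equal_is_suspicious_content_py : Prop := ∀ (content : String), Dom_is_suspicious_content_py content → Spec_is_suspicious_content_py content (is_suspicious_content_py content)

-- ===== LEMMAS AND PROOFS =====

-- final value of B's current-run counter (proof-only helper, Nat-valued)
def pvRunN : List Char → Nat → Nat
  | [], r => r
  | c :: t, r => if c = ' ' then pvRunN t (r + 1) else pvRunN t 0

-- final value of B's max-run counter (proof-only helper, Nat-valued)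
def pvMaxN : List Char → Nat → Nat → Nat
  | [], _, m => m
  | c :: t, r, m => if c = ' ' then pvMaxN t (r + 1) (if r + 1 > m then r + 1 else m) else pvMaxN t 0 m

theorem pvAltStep_eq (n s : Int) (a w : Bool) (r m : Nat) (c : Char) :
    pvAltStep (n, s, a, w, (r : Int), (m : Int)) c =
      (n + 1,
       s + (if !(PySem.Chars.isalnum c) && !(PySem.Chars.isspace c) then 1 else 0),
       a || PySem.Chars.isalnum c,
       w || (PySem.Chars.isalnum c || !(PySem.Chars.isspace c)),
       ((if c = ' ' then r + 1 else 0 : Nat) : Int),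
       ((if c = ' ' then (if r + 1 > m then r + 1 else m) else m : Nat) : Int)) := by
  by_cases hc : c = ' '
  · subst hc
    simp [pvAltStep, show PySem.Chars.isalnum ' ' = false from by decide,
          show PySem.Chars.isspace ' ' = true from by decide]
  · by_cases hal : PySem.Chars.isalnum c <;> by_cases hsp : PySem.Chars.isspace c <;>
      simp [pvAltStep, hal, hsp, hc]

-- the fold's six components in closed form
theorem pvFoldl_altStep (l : List Char) (n s : Int) (a w : Bool) (r m : Nat) :
    l.foldl pvAltStep (n, s, a, w, (r : Int), (m : Int)) =
      (n + l.length,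
       s + (l.countP (fun c => !(PySem.Chars.isalnum c) && !(PySem.Chars.isspace c)) : Int),
       a || l.any PySem.Chars.isalnum,
       w || l.any (fun c => PySem.Chars.isalnum c || !(PySem.Chars.isspace c)),
       (pvRunN l r : Int), (pvMaxN l r m : Int)) := by
  induction l generalizing n s a w r m with
  | nil => simp [pvRunN, pvMaxN]
  | cons c t ih =>
    rw [List.foldl_cons, pvAltStep_eq, ih]
    simp only [pvRunN, pvMaxN, List.countP_cons, List.any_cons, List.length_cons, Prod.ext_iff]
    refine ⟨by push_cast; ring, ?_, ?_, ?_, ?_, ?_⟩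
    · push_cast; split_ifs <;> omega
    · simp [Bool.or_assoc]
    · simp [Bool.or_assoc]
    · by_cases hc : c = ' ' <;> simp [hc]
    · by_cases hc : c = ' ' <;> simp [hc]

-- a whitespace char inside the ASCII/tab/newline/CR domain is never alphanumeric
theorem pvSpace_not_alnum (c : Char) (hd : pvDomChar c = true)
    (hs : PySem.Chars.isspace c = true) : PySem.Chars.isalnum c = false := by
  have hn : c.toNat = 9 ∨ c.toNat = 10 ∨ c.toNat = 13 ∨ c.toNat = 32 := by
    simp only [pvDomChar, Bool.or_eq_true, Bool.and_eq_true, decide_eq_true_eq, beq_iff_eq] at hd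
    simp only [PySem.Chars.isspace, Bool.or_eq_true, Bool.and_eq_true, decide_eq_true_eq] at hs
    omega
  have hofn : Char.ofNat c.toNat = c := Char.ofNat_toNat c
  rcases hn with h | h | h | h <;> rw [h] at hofn <;> rw [← hofn] <;> decide

-- strip is empty iff everything is whitespace
theorem pvStrip_nil_iff (l : List Char) :
    PySem.Chars.strip l = [] ↔ ∀ c ∈ l, PySem.Chars.isspace c = true := by
  unfold PySem.Chars.strip PySem.Chars.rstrip PySem.Chars.lstrip
  constructor
  · intro h c hc
    have hrev : List.dropWhile PySem.Chars.isspace (List.dropWhile PySem.Chars.isspace l).reverse = [] := by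
      simpa [List.reverse_eq_nil_iff] using h
    have hall : ∀ x ∈ (List.dropWhile PySem.Chars.isspace l).reverse, PySem.Chars.isspace x = true :=
      List.dropWhile_eq_nil_iff.mp hrev
    have hall2 : ∀ x ∈ List.dropWhile PySem.Chars.isspace l, PySem.Chars.isspace x = true := by
      intro x hx; exact hall x (List.mem_reverse.mpr hx)
    have hnil : List.dropWhile PySem.Chars.isspace l = [] := by
      cases hdw : List.dropWhile PySem.Chars.isspace l with
      | nil => rfl
      | cons h t =>
        have hhead : PySem.Chars.isspace h = false := by
          have := List.head_dropWhile_not (p := PySem.Chars.isspace) (l := l) (by simp [hdw])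
          simpa [hdw] using this
        have := hall2 h (by simp [hdw])
        simp [this] at hhead
    have : ∀ x ∈ l, PySem.Chars.isspace x = true := List.dropWhile_eq_nil_iff.mp hnil
    exact this c hc
  · intro h
    have h1 : List.dropWhile PySem.Chars.isspace l = [] := List.dropWhile_eq_nil_iff.mpr h
    simp [h1]

-- prefixes among space-runs
theorem pvReplicate_prefix (a b : Nat) (h : a ≤ b) :
    List.replicate a ' ' <+: List.replicate b ' ' :=
  ⟨List.replicate (b - a) ' ', by rw [← List.replicate_add]; congr 1; omega⟩

-- 20 ≤ the max-run accumulator iff 20 consecutive spaces occur (shifted by the incoming run)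
theorem pvMaxN_ge_iff (l : List Char) (r m : Nat) (hrm : r ≤ m) :
    20 ≤ pvMaxN l r m ↔
      20 ≤ m ∨ List.replicate (20 - r) ' ' <+: l ∨ List.replicate 20 ' ' <:+: l := by
  induction l generalizing r m with
  | nil =>
    simp only [pvMaxN, List.prefix_nil, List.replicate_eq_nil_iff]
    constructor
    · intro h; left; exact h
    · rintro (h | h | h)
      · exact h
      · omega
      · exact absurd (List.IsInfix.sublist h).length_le (by simp)
  | cons c t ih =>
    by_cases hc : c = ' '
    · subst hc
      rw [show pvMaxN (' ' :: t) r m = pvMaxN t (r + 1) (if r + 1 > m then r + 1 else m) by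
        simp [pvMaxN]]
      rw [ih (r + 1) _ (by split_ifs <;> omega)]
      by_cases hr : 20 ≤ r + 1
      · have hpre : List.replicate (20 - r) ' ' <+: (' ' :: t) :=
          (pvReplicate_prefix (20 - r) 1 (by omega)).trans ⟨t, by simp⟩
        constructor
        · intro _; exact Or.inr (Or.inl hpre)
        · intro _; exact Or.inl (by split_ifs <;> omega)
      · have hMm : (20 ≤ (if r + 1 > m then r + 1 else m)) ↔ 20 ≤ m := by
          split_ifs <;> omega
        rw [hMm]
        have hsplit : 20 - r = (20 - (r + 1)) + 1 := by omega
        constructor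
        · rintro (h | h | h)
          · exact Or.inl h
          · refine Or.inr (Or.inl ?_)
            rw [hsplit, List.replicate_succ]
            exact List.cons_prefix_cons.mpr ⟨rfl, h⟩
          · exact Or.inr (Or.inr (h.trans (List.suffix_cons ' ' t).isInfix))
        · rintro (h | h | h)
          · exact Or.inl h
          · refine Or.inr (Or.inl ?_)
            rw [hsplit, List.replicate_succ] at h
            exact (List.cons_prefix_cons.mp h).2
          · rcases List.infix_cons_iff.mp h with h2 | h2
            · refine Or.inr (Or.inl ?_)
              rw [show (20 : Nat) = 19 + 1 from rfl, List.replicate_succ] at h2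
              exact (pvReplicate_prefix (20 - (r + 1)) 19 (by omega)).trans
                (List.cons_prefix_cons.mp h2).2
            · exact Or.inr (Or.inr h2)
    · rw [show pvMaxN (c :: t) r m = pvMaxN t 0 m by simp [pvMaxN, hc]]
      rw [ih 0 m (by omega)]
      constructor
      · rintro (h | h | h)
        · exact Or.inl h
        · exact Or.inr (Or.inr (h.isInfix.trans (List.suffix_cons c t).isInfix))
        · exact Or.inr (Or.inr (h.trans (List.suffix_cons c t).isInfix))
      · rintro (h | h | h)
        · exact Or.inl h
        · by_cases hr : 20 ≤ r
          · exact Or.inl (by omega)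
          · exfalso
            rw [show 20 - r = (20 - (r + 1)) + 1 by omega, List.replicate_succ] at h
            exact hc ((List.cons_prefix_cons.mp h).1.symm)
        · rcases List.infix_cons_iff.mp h with h2 | h2
          · exfalso
            rw [show (20 : Nat) = 19 + 1 from rfl, List.replicate_succ] at h2
            exact hc ((List.cons_prefix_cons.mp h2).1.symm)
          · exact Or.inr (Or.inr h2)

-- any (alnum ∨ ¬space) = any (¬space) inside the domain
theorem pvAny_nonspace (l : List Char) (hd : ∀ c ∈ l, pvDomChar c = true) :
    l.any (fun c => PySem.Chars.isalnum c || !(PySem.Chars.isspace c))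
      = l.any (fun c => !(PySem.Chars.isspace c)) := by
  induction l with
  | nil => rfl
  | cons c t ih =>
    have hdc := hd c (by simp)
    have ht := ih (fun x hx => hd x (by simp [hx]))
    by_cases hs : PySem.Chars.isspace c = true
    · simp [hs, pvSpace_not_alnum c hdc hs, ht]
    · simp only [Bool.not_eq_true] at hs
      simp [hs, ht]

-- ===== VERDICT (by name: the statement is the Claim_ definition above) =====
theorem is_suspicious_content_py_spec : Claim_equal_is_suspicious_content_py := by
  intro content hdom
  unfold Spec_is_suspicious_content_py
  unfold is_suspicious_content_py is_suspicious_content_py_alt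
  have hdom' : ∀ c ∈ content.toList, pvDomChar c = true := by
    unfold Dom_is_suspicious_content_py pvDomStr at hdom
    simpa [List.all_eq_true] using hdom
  rw [show ((0 : Int), (0 : Int), false, false, (0 : Int), (0 : Int))
        = ((0 : Int), (0 : Int), false, false, ((0 : Nat) : Int), ((0 : Nat) : Int)) by norm_num]
  rw [pvFoldl_altStep, PySem.List.foldl_if_add_one, pvAny_nonspace content.toList hdom']
  set L := content.toList with hL
  have hlen : PySem.Str.len content = (L.length : Int) := PySem.Str.len_eq content
  have hstrip : (PySem.Str.len (PySem.Str.strip content) == 0)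
      = decide (∀ c ∈ L, PySem.Chars.isspace c = true) := by
    have h1 : PySem.Str.len (PySem.Str.strip content)
        = ((PySem.Chars.strip L).length : Int) := by
      simp [PySem.Str.strip, PySem.Str.len_eq, hL]
    rw [h1]
    by_cases h : ∀ c ∈ L, PySem.Chars.isspace c = true
    · rw [(pvStrip_nil_iff L).mpr h]
      simp
      exact h
    · have hnn : PySem.Chars.strip L ≠ [] := fun hn => h ((pvStrip_nil_iff L).mp hn)
      have hln : (PySem.Chars.strip L).length ≠ 0 := by
        simpa [List.length_eq_zero_iff] using hnn
      simp [h, hln]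
  have hisin : PySem.Str.isIn "                    " content
      = decide (List.replicate 20 ' ' <:+: L) := by
    have hts : ("                    " : String).toList = List.replicate 20 ' ' := by decide
    by_cases h : List.replicate 20 ' ' <:+: L
    · rw [(PySem.Str.isIn_iff_infix _ _).mpr (by rw [hts]; exact h)]
      exact (decide_eq_true h).symm
    · have hfalse : PySem.Str.isIn "                    " content = false := by
        cases hiv : PySem.Str.isIn "                    " content
        · rfl
        · exact absurd (hts ▸ (PySem.Str.isIn_iff_infix _ _).mp hiv) h
      rw [hfalse]
      exact (decide_eq_false h).symm
  have hmax : (20 ≤ ((pvMaxN L 0 0 : Nat) : Int)) ↔ List.replicate 20 ' ' <:+: L := by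
    rw [show ((20 : Int) ≤ ((pvMaxN L 0 0 : Nat) : Int)) ↔ 20 ≤ pvMaxN L 0 0 by
      exact_mod_cast Iff.rfl]
    rw [pvMaxN_ge_iff L 0 0 (le_refl 0)]
    constructor
    · rintro (h | h | h)
      · omega
      · exact (by simpa using h : List.replicate 20 ' ' <+: L).isInfix
      · exact h
    · intro h; exact Or.inr (Or.inr h)
  set cnt := L.countP (fun c => !(PySem.Chars.isalnum c) && !(PySem.Chars.isspace c)) with hcnt
  rw [hlen, hstrip, hisin]
  simp only [zero_add, Bool.false_or, hmax]
  by_cases hnil : L = []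
  · simp [hnil, hcnt]
  · have hlen0 : 0 < L.length := List.length_pos_iff.mpr hnil
    have h0' : (0 : Int) < (L.length : Int) := by exact_mod_cast hlen0
    by_cases hws : ∀ c ∈ L, PySem.Chars.isspace c = true
    · have hany : (L.any fun c => !(PySem.Chars.isspace c)) = false := by
        simp only [List.any_eq_false]
        intro c hc; simp [hws c hc]
      simp [hany]
      exact Or.inl (Or.inr hws)
    · have hany : (L.any fun c => !(PySem.Chars.isspace c)) = true := by
        simp only [List.any_eq_true]
        rcases not_forall.mp hws with ⟨c, hc⟩
        rcases Classical.not_imp.mp hc with ⟨hcm, hcs⟩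
        exact ⟨c, hcm, by simp [hcs]⟩
      have hne : ((L.length : Int) == 0) = false := by
        simp only [beq_eq_false_iff_ne, ne_eq]
        omega
      have hdws : decide (∀ c ∈ L, PySem.Chars.isspace c = true) = false := decide_eq_false hws
      by_cases hr : (L.length : Int) < 2 * (cnt : Int)
      · simp [hr, hne, hdws, hany]
        exact Or.inl hlen0
      · by_cases hinf : List.replicate 20 ' ' <:+: L
        · have hinf' : ([' ', ' ', ' ', ' ', ' ', ' ', ' ', ' ', ' ', ' ', ' ', ' ', ' ', ' ',
              ' ', ' ', ' ', ' ', ' ', ' '] <:+: L) := by simpa using hinf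
          simp [hr, hne, hdws, hany, hinf']
        · have hninf' : ¬ ([' ', ' ', ' ', ' ', ' ', ' ', ' ', ' ', ' ', ' ', ' ', ' ', ' ', ' ',
              ' ', ' ', ' ', ' ', ' ', ' '] <:+: L) := by simpa using hinf
          by_cases h10 : (10 : Int) < (L.length : Int)
          · cases ha : L.any PySem.Chars.isalnum with
            | false =>
              have hall : ∀ x ∈ L, PySem.Chars.isalnum x = false := fun x hx => by
                simpa using List.any_eq_false.mp ha x hx
              simp [hr, hninf', h10, hne, hdws, hany]
            | true =>
              have hnall : ¬ (∀ x ∈ L, PySem.Chars.isalnum x = false) := by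
                rcases List.any_eq_true.mp ha with ⟨x, hx, hxa⟩
                exact fun hall => by simp [hall x hx] at hxa
              simp [hr, hninf', h10, hne, hdws, hany]
          · simp [hr, hninf', h10, hne, hdws, hany]
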